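-- pv_equiv track=rewrite | github.com/maximejkb/maxime.github.io | clippings/structures/clusters.py | populate_board
-- ===== SOURCE A (Python) =====
-- MAX_X = 100
--
-- MAX_Y = 25
--
-- def populate_board(nodes):
--     plane = []
--     for y in range(MAX_Y):
--         row = ""
--         for x in range(MAX_X):
--             if (x, y) in nodes:
--                 row += "."
--             else:
--                 row += " "
--         plane.append(row)
--
--     return plane
-- ===== SOURCE B (Python) =====
-- MAX_X = 100
--
-- MAX_Y = 25
--
-- def populate_board(nodes):
--     board = [[" "] * MAX_X for _ in range(MAX_Y)]
--     for x, y in nodes: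
--         if 0 <= x < MAX_X and 0 <= y < MAX_Y:
--             board[y][x] = "."
--     return ["".join(row) for row in board]
-- ===== Notes on version B (the rewrite author's own statement) =====
-- stated objective: faster
-- what changed: B allocates a blank 25x100 board once and sets only the in-range node cells while iterating over nodes, instead of scanning all 2500 cells and doing a linear membership test in nodes at each cell.
import Mathlib
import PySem

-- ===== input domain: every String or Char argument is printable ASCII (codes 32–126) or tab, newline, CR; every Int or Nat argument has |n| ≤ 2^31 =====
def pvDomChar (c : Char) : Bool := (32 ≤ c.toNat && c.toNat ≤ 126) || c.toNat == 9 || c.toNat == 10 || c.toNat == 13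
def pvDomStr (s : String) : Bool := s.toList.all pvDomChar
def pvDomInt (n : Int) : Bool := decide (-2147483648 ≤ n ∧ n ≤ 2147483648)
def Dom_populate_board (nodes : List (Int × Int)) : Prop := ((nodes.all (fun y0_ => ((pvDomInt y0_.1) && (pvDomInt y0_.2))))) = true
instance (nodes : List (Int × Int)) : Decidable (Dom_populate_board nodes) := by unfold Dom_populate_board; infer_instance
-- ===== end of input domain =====

-- B replaces A's 2500-cell scan with a linear membership test per cell by a blank
-- 25x100 board built once, marking only the in-range node cells: O(area + n) vs O(area * n).

-- ===== PORT A =====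
-- Python string concatenation 'row += "."' is modeled exactly over List Char,
-- with String.mk applied when the finished row is appended to the plane.
def populate_board (nodes : List (Int × Int)) : List String :=
  (PySem.List.pyRange 0 25 1).foldl (fun plane y =>
    plane ++ [String.mk ((PySem.List.pyRange 0 100 1).foldl
      (fun row x => row ++ (if (x, y) ∈ nodes then ['.'] else [' '])) [])]) []

-- ===== PORT B =====
def populate_board_alt (nodes : List (Int × Int)) : List String :=
  (nodes.foldl (fun b p =>
      if 0 ≤ p.1 ∧ p.1 < 100 ∧ 0 ≤ p.2 ∧ p.2 < 25 then
        b.modify p.2.toNat (fun row => row.set p.1.toNat '.')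
      else b)
    (List.replicate 25 (List.replicate 100 ' '))).map String.mk

-- ===== PRECONDITION & SPEC =====
def Spec_populate_board (nodes : List (Int × Int)) (out : List String) : Prop := out = populate_board_alt nodes
instance (nodes : List (Int × Int)) (out : List String) : Decidable (Spec_populate_board nodes out) := by unfold Spec_populate_board; infer_instance

-- ===== CLAIM (what is proved, stated in full; the proofs are below) =====
def Claim_equal_populate_board : Prop := ∀ (nodes : List (Int × Int)), Dom_populate_board nodes → Spec_populate_board nodes (populate_board nodes)

-- ===== LEMMAS AND PROOFS =====

-- the canonical board a predicate P (row y, column x) describes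
def pvBoardOf (P : Nat → Nat → Bool) : List (List Char) :=
  (List.range 25).map (fun y => (List.range 100).map (fun x => if P y x then '.' else ' '))

theorem pvBoardOf_congr (P Q : Nat → Nat → Bool)
    (h : ∀ y < 25, ∀ x < 100, P y x = Q y x) : pvBoardOf P = pvBoardOf Q := by
  unfold pvBoardOf
  refine List.map_congr_left (fun y hy => ?_)
  refine List.map_congr_left (fun x hx => ?_)
  rw [h y (List.mem_range.mp hy) x (List.mem_range.mp hx)]

theorem pv_map_range_set {α : Type} (n i : Nat) (f : Nat → α) (a : α) :
    ((List.range n).map f).set i a = (List.range n).map (fun j => if i = j then a else f j) := by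
  refine List.ext_getElem (by simp) ?_
  intro j h1 h2
  simp only [List.getElem_set, List.getElem_map, List.getElem_range]

theorem pv_map_range_modify {α : Type} (n i : Nat) (f : Nat → α) (g : α → α) :
    ((List.range n).map f).modify i g
      = (List.range n).map (fun j => if i = j then g (f j) else f j) := by
  refine List.ext_getElem (by simp) (fun j h1 h2 => ?_)
  simp only [List.getElem_modify, List.getElem_map, List.getElem_range]

theorem pv_blank_eq : List.replicate 25 (List.replicate 100 ' ')
    = pvBoardOf (fun _ _ => false) := by
  unfold pvBoardOf
  simp [List.map_const']

theorem pv_foldl_boardOf (ns : List (Int × Int)) : ∀ (P : Nat → Nat → Bool),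
    ns.foldl (fun b p =>
      if 0 ≤ p.1 ∧ p.1 < 100 ∧ 0 ≤ p.2 ∧ p.2 < 25 then
        b.modify p.2.toNat (fun row => row.set p.1.toNat '.')
      else b) (pvBoardOf P)
    = pvBoardOf (fun y x => P y x || decide (((x : Int), (y : Int)) ∈ ns)) := by
  induction ns with
  | nil => intro P; simp [List.foldl]
  | cons p ns ih =>
    intro P
    simp only [List.foldl_cons]
    by_cases hp : 0 ≤ p.1 ∧ p.1 < 100 ∧ 0 ≤ p.2 ∧ p.2 < 25
    · rw [if_pos hp]
      have step : (pvBoardOf P).modify p.2.toNat (fun row => row.set p.1.toNat '.')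
          = pvBoardOf (fun y x => P y x || (decide (y = p.2.toNat) && decide (x = p.1.toNat))) := by
        unfold pvBoardOf
        rw [pv_map_range_modify]
        refine List.map_congr_left (fun y hy => ?_)
        by_cases hyp : p.2.toNat = y
        · rw [if_pos hyp, pv_map_range_set 100 p.1.toNat _ '.']
          refine List.map_congr_left (fun x hx => ?_)
          by_cases hxp : p.1.toNat = x
          · simp [hxp, hyp.symm]
          · have hxp' : ¬ (x = p.1.toNat) := fun h => hxp h.symm
            simp [hxp, hyp.symm, hxp']
        · rw [if_neg hyp]
          refine List.map_congr_left (fun x hx => ?_)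
          have : ¬ (y = p.2.toNat) := fun h => hyp h.symm
          simp [this]
      rw [step, ih]
      refine pvBoardOf_congr _ _ (fun y hy x hx => ?_)
      have hxy : (((x : Int), (y : Int)) = p) ↔ (y = p.2.toNat ∧ x = p.1.toNat) := by
        rcases p with ⟨px, py⟩
        simp only [Prod.mk.injEq]
        constructor
        · rintro ⟨h1, h2⟩; constructor <;> omega
        · rintro ⟨h1, h2⟩; constructor <;> omega
      by_cases hm : ((x : Int), (y : Int)) ∈ ns
      · have d4 : decide (((x : Int), (y : Int)) ∈ ns) = true := decide_eq_true hm
        have d5 : decide (((x : Int), (y : Int)) ∈ p :: ns) = true :=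
          decide_eq_true (List.mem_cons.mpr (Or.inr hm))
        rw [d4, d5]; simp
      · have d4 : decide (((x : Int), (y : Int)) ∈ ns) = false := decide_eq_false hm
        by_cases he : ((x : Int), (y : Int)) = p
        · obtain ⟨h1, h2⟩ := hxy.mp he
          have d1 : decide (y = p.2.toNat) = true := decide_eq_true h1
          have d2 : decide (x = p.1.toNat) = true := decide_eq_true h2
          have d5 : decide (((x : Int), (y : Int)) ∈ p :: ns) = true :=
            decide_eq_true (List.mem_cons.mpr (Or.inl he))
          rw [d1, d2, d4, d5]; simp
        · have d5 : decide (((x : Int), (y : Int)) ∈ p :: ns) = false :=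
            decide_eq_false (by
              rw [List.mem_cons]
              rintro (h | h)
              · exact he h
              · exact hm h)
          have h1 : ¬ (y = p.2.toNat ∧ x = p.1.toNat) := fun h => he (hxy.mpr h)
          by_cases hy2 : y = p.2.toNat
          · have hx2 : ¬ x = p.1.toNat := fun h => h1 ⟨hy2, h⟩
            have d2 : decide (x = p.1.toNat) = false := decide_eq_false hx2
            rw [d2, d4, d5]; simp
          · have d1 : decide (y = p.2.toNat) = false := decide_eq_false hy2
            rw [d1, d4, d5]; simp
    · rw [if_neg hp, ih]
      refine pvBoardOf_congr _ _ (fun y hy x hx => ?_)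
      have hne : ¬ (((x : Int), (y : Int)) = p) := by
        rcases p with ⟨px, py⟩
        simp only [Prod.mk.injEq, not_and]
        intro h1 h2; omega
      simp [List.mem_cons, hne]

theorem pv_foldl_append {α : Type} (g : Int → α) : ∀ (n : Nat) (acc : List α),
    (PySem.List.pyRange 0 (n : Int) 1).foldl (fun l x => l ++ [g x]) acc
      = acc ++ (List.range n).map (fun k : Nat => g (k : Int)) := by
  intro n
  induction n with
  | zero => intro acc; simp
  | succ m ih =>
    intro acc
    have h : PySem.List.pyRange 0 ((m : Int) + 1) 1
        = PySem.List.pyRange 0 (m : Int) 1 ++ [(m : Int)] :=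
      PySem.List.pyRange_one_succ_right (by positivity)
    rw [show ((m + 1 : Nat) : Int) = (m : Int) + 1 by push_cast; ring, h]
    rw [List.foldl_append, ih]
    simp [List.range_succ]

set_option maxHeartbeats 1000000 in
theorem pv_A_eq (nodes : List (Int × Int)) :
    populate_board nodes
      = (List.range 25).map (fun y : Nat => String.mk ((List.range 100).map
          (fun x : Nat => if ((x : Int), (y : Int)) ∈ nodes then '.' else ' '))) := by
  unfold populate_board
  simp only [← apply_ite (fun c : Char => [c])]
  rw [show (25 : Int) = ((25 : Nat) : Int) by norm_num]
  rw [pv_foldl_append (fun y => String.mk ((PySem.List.pyRange 0 100 1).foldl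
      (fun row x => row ++ [if (x, y) ∈ nodes then '.' else ' ']) [])) 25 []]
  simp only [List.nil_append]
  refine List.map_congr_left (fun y hy => ?_)
  refine congrArg String.mk ?_
  rw [show (100 : Int) = ((100 : Nat) : Int) by norm_num]
  rw [pv_foldl_append (fun x => if (x, (y : Int)) ∈ nodes then '.' else ' ') 100 []]
  simp

-- ===== VERDICT (by name: the statement is the Claim_ definition above) =====
theorem populate_board_spec : Claim_equal_populate_board := by
  intro nodes _
  unfold Spec_populate_board populate_board_alt
  rw [pv_blank_eq, pv_foldl_boardOf nodes (fun _ _ => false), pv_A_eq]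
  unfold pvBoardOf
  rw [List.map_map]
  refine List.map_congr_left (fun y hy => ?_)
  simp only [Function.comp]
  refine congrArg String.mk ?_
  refine List.map_congr_left (fun x hx => ?_)
  by_cases h : ((x : Int), (y : Int)) ∈ nodes <;> simp [h]
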